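-- pv_equiv track=rewrite | github.com/lewisclark/natives2luacheck | main.py | separate_per_realm
-- ===== SOURCE A (Python) =====
-- def separate_per_realm(funcs):
--     cl, sv, sh = [], [], []
--
--     for func in funcs:
--         realm = func["realm"]
--
--         if realm == "client":
--             cl.append(func)
--         elif realm == "server":
--             sv.append(func)
--         elif realm == "shared":
--             sh.append(func)
--
--     return cl, sv, sh
-- ===== SOURCE B (Python) =====
-- def separate_per_realm(funcs):
--     order = {"client": 0, "server": 1, "shared": 2}
--     kept = [f for f in funcs if f["realm"] in order]
--     kept.sort(key=lambda f: order[f["realm"]])  # stable: input order preserved within each realm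
--     c = sum(1 for f in kept if order[f["realm"]] == 0)
--     s = sum(1 for f in kept if order[f["realm"]] == 1)
--     return kept[:c], kept[c:c + s], kept[c + s:]
-- ===== Notes on version B (the rewrite author's own statement) =====
-- stated objective: alternative
-- what changed: Replaces A's one-pass three-accumulator branching loop by a stable sort of the relevant entries on a numeric realm rank followed by counting and slicing the sorted list into three contiguous segments.
import Mathlib
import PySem

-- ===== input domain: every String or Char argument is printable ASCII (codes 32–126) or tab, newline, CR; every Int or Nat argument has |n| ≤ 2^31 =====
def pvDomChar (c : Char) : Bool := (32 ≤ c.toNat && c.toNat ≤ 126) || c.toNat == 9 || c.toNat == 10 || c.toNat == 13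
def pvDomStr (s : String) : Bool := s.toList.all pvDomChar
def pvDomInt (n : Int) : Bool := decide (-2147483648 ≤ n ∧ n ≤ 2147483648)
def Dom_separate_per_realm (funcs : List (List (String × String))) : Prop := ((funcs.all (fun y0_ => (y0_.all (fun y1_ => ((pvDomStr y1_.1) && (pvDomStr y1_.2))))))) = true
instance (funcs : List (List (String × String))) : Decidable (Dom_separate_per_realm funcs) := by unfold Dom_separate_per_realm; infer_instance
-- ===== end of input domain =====

-- B replaces A's single branching pass by a stable sort on a realm rank plus slicing; objective: alternative algorithm.

-- ===== PORT A =====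
-- func["realm"] = first-match association lookup; none (KeyError in Python) is excluded by Pre_.
-- pvStepA is the body of A's for-loop (one iteration over the (cl, sv, sh) state).
def pvStepA (acc : (List (List (String × String))) × (List (List (String × String))) × (List (List (String × String)))) (func : List (String × String)) : (List (List (String × String))) × (List (List (String × String))) × (List (List (String × String))) :=
  match func.lookup "realm" with
  | some realm =>
    if realm == "client" then (acc.1 ++ [func], acc.2.1, acc.2.2)
    else if realm == "server" then (acc.1, acc.2.1 ++ [func], acc.2.2)
    else if realm == "shared" then (acc.1, acc.2.1, acc.2.2 ++ [func])
    else acc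
  | none => acc

def separate_per_realm (funcs : List (List (String × String))) : (List (List (String × String))) × (List (List (String × String))) × (List (List (String × String))) :=
  funcs.foldl pvStepA ([], [], [])

-- ===== PORT B =====
-- pvKeep f = (f["realm"] in order); none (KeyError) excluded by Pre_.
def pvKeep (f : List (String × String)) : Bool :=
  match f.lookup "realm" with
  | some r => r == "client" || r == "server" || r == "shared"
  | none => false

-- pvRank f = order[f["realm"]]; B only applies it to kept elements, where the default branch (3) is unreachable.
def pvRank (f : List (String × String)) : Int :=
  match f.lookup "realm" with
  | some r => if r == "client" then 0 else if r == "server" then 1 else if r == "shared" then 2 else 3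
  | none => 3

def separate_per_realm_alt (funcs : List (List (String × String))) : (List (List (String × String))) × (List (List (String × String))) × (List (List (String × String))) :=
  let kept := funcs.filter pvKeep
  let srt := PySem.List.sorted kept pvRank    -- kept.sort(key=...): Python's stable sort
  let c := (srt.filter (fun f => pvRank f == 0)).length
  let s := (srt.filter (fun f => pvRank f == 1)).length
  -- kept[:c], kept[c:c+s], kept[c+s:] with 0 ≤ c, c+s ≤ len(kept): exactly take/drop here
  (srt.take c, (srt.drop c).take s, srt.drop (c + s))

-- ===== PRECONDITION & SPEC =====
-- Pre_ excludes inputs where some dict lacks a "realm" key: Python A raises KeyError there.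
def Pre_separate_per_realm (funcs : List (List (String × String))) : Prop :=
  ∀ f ∈ funcs, (f.lookup "realm").isSome = true
instance (funcs : List (List (String × String))) : Decidable (Pre_separate_per_realm funcs) := by unfold Pre_separate_per_realm; infer_instance
def pvWitness_separate_per_realm : (List (List (String × String))) :=
  [[("realm", "client"), ("name", "Foo")], [("realm", "shared")], [("realm", "menu")]]
def Spec_separate_per_realm (funcs : List (List (String × String))) (out : (List (List (String × String))) × (List (List (String × String))) × (List (List (String × String)))) : Prop := out = separate_per_realm_alt funcs
instance (funcs : List (List (String × String))) (out : (List (List (String × String))) × (List (List (String × String))) × (List (List (String × String)))) : Decidable (Spec_separate_per_realm funcs out) := by unfold Spec_separate_per_realm; infer_instance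

-- ===== CLAIM (what is proved, stated in full; the proofs are below) =====
def Claim_equal_separate_per_realm : Prop := ∀ (funcs : List (List (String × String))), Dom_separate_per_realm funcs → Pre_separate_per_realm funcs → Spec_separate_per_realm funcs (separate_per_realm funcs)

-- ===== LEMMAS AND PROOFS =====

-- A's loop computes the three realm filters, in input order.
theorem separate_loop (funcs : List (List (String × String)))
    (cl sv sh : List (List (String × String))) :
    funcs.foldl pvStepA (cl, sv, sh)
    = (cl ++ funcs.filter (fun f => f.lookup "realm" == some "client"),
       sv ++ funcs.filter (fun f => f.lookup "realm" == some "server"),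
       sh ++ funcs.filter (fun f => f.lookup "realm" == some "shared")) := by
  induction funcs generalizing cl sv sh with
  | nil => simp
  | cons f rest ih =>
    rw [List.foldl_cons]
    simp only [List.filter_cons]
    cases h : f.lookup "realm" with
    | none =>
      rw [show pvStepA (cl, sv, sh) f = (cl, sv, sh) by simp [pvStepA, h], ih]
      simp
    | some r =>
      by_cases h1 : r = "client"
      · rw [show pvStepA (cl, sv, sh) f = (cl ++ [f], sv, sh) by simp [pvStepA, h, h1], ih]
        simp [h1]
      · by_cases h2 : r = "server"
        · rw [show pvStepA (cl, sv, sh) f = (cl, sv ++ [f], sh) by simp [pvStepA, h, h2], ih]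
          simp [h2]
        · by_cases h3 : r = "shared"
          · rw [show pvStepA (cl, sv, sh) f = (cl, sv, sh ++ [f]) by simp [pvStepA, h, h3], ih]
            simp [h3]
          · rw [show pvStepA (cl, sv, sh) f = (cl, sv, sh) by simp [pvStepA, h, h1, h2, h3], ih]
            simp [h1, h2, h3]

-- Inserting past a prefix the element never goes before.
theorem insertBy_append_left {α : Type} (before : α → α → Bool) (x : α)
    (a zs : List α) (ha : ∀ y ∈ a, before x y = false) :
    PySem.List.insertBy before x (a ++ zs) = a ++ PySem.List.insertBy before x zs := by
  induction a with
  | nil => simp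
  | cons y ys ih =>
    have hy : before x y = false := ha y (by simp)
    simp only [List.cons_append, PySem.List.insertBy, hy]
    simp [ih (fun z hz => ha z (by simp [hz]))]

-- Inserting before a list whose head (if any) the element goes before.
theorem insertBy_cons_head {α : Type} (before : α → α → Bool) (x : α)
    (zs : List α) (h : ∀ z ∈ zs.head?, before x z = true) :
    PySem.List.insertBy before x zs = x :: zs := by
  cases zs with
  | nil => rfl
  | cons z t => simp [PySem.List.insertBy, h z rfl]

-- pvKeep means the rank is 0, 1 or 2.
theorem rank_of_keep (f : List (String × String)) (h : pvKeep f = true) :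
    pvRank f = 0 ∨ pvRank f = 1 ∨ pvRank f = 2 := by
  unfold pvKeep at h
  unfold pvRank
  cases hl : f.lookup "realm" with
  | none => simp [hl] at h
  | some r =>
    rw [hl] at h
    by_cases h1 : r = "client" <;> by_cases h2 : r = "server" <;> by_cases h3 : r = "shared" <;>
      simp [h1, h2, h3] at h ⊢

-- The insertion-sort fold over rank-kept elements appends each element to the end of its rank segment.
theorem foldl_ins (ys a b c : List (List (String × String)))
    (ha : ∀ x ∈ a, pvRank x = 0) (hb : ∀ x ∈ b, pvRank x = 1) (hc : ∀ x ∈ c, pvRank x = 2)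
    (hy : ∀ x ∈ ys, pvKeep x = true) :
    ys.foldl (fun acc x => PySem.List.insertBy (fun p q => decide (pvRank p < pvRank q)) x acc) (a ++ b ++ c)
    = (a ++ ys.filter (fun f => pvRank f == 0))
      ++ (b ++ ys.filter (fun f => pvRank f == 1))
      ++ (c ++ ys.filter (fun f => pvRank f == 2)) := by
  induction ys generalizing a b c with
  | nil => simp
  | cons x t ih =>
    have hx := rank_of_keep x (hy x (by simp))
    have ht : ∀ z ∈ t, pvKeep z = true := fun z hz => hy z (by simp [hz])
    rw [List.foldl_cons]
    simp only [List.filter_cons]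
    rcases hx with h0 | h1 | h2
    · have hstep : PySem.List.insertBy (fun p q => decide (pvRank p < pvRank q)) x (a ++ b ++ c)
          = (a ++ [x]) ++ b ++ c := by
        rw [List.append_assoc,
          insertBy_append_left _ x a (b ++ c) (fun y hy' => by simp [ha y hy', h0]),
          insertBy_cons_head _ x (b ++ c) ?_]
        · simp
        · intro z hz
          have hz' : z ∈ b ++ c := List.mem_of_mem_head? hz
          rcases List.mem_append.mp hz' with h | h
          · simp [hb z h, h0]
          · simp [hc z h, h0]
      have ha' : ∀ y ∈ a ++ [x], pvRank y = 0 := by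
        intro y hy'
        rcases List.mem_append.mp hy' with h | h
        · exact ha y h
        · simp at h; simp [h, h0]
      rw [hstep, ih (a ++ [x]) b c ha' hb hc ht]
      simp [h0]
    · have hstep : PySem.List.insertBy (fun p q => decide (pvRank p < pvRank q)) x (a ++ b ++ c)
          = a ++ (b ++ [x]) ++ c := by
        rw [List.append_assoc,
          insertBy_append_left _ x a (b ++ c) (fun y hy' => by simp [ha y hy', h1]),
          insertBy_append_left _ x b c (fun y hy' => by simp [hb y hy', h1]),
          insertBy_cons_head _ x c (fun z hz => by
            simp [hc z (List.mem_of_mem_head? hz), h1])]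
        simp
      have hb' : ∀ y ∈ b ++ [x], pvRank y = 1 := by
        intro y hy'
        rcases List.mem_append.mp hy' with h | h
        · exact hb y h
        · simp at h; simp [h, h1]
      rw [hstep, ih a (b ++ [x]) c ha hb' hc ht]
      simp [h1]
    · have hstep : PySem.List.insertBy (fun p q => decide (pvRank p < pvRank q)) x (a ++ b ++ c)
          = a ++ b ++ (c ++ [x]) := by
        rw [PySem.List.insertBy_of_forall_not_before _ x (a ++ b ++ c) ?_]
        · simp
        · intro y hy'
          rcases List.mem_append.mp hy' with h | h
          · rcases List.mem_append.mp h with h' | h'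
            · simp [ha y h', h2]
            · simp [hb y h', h2]
          · simp [hc y h, h2]
      have hc' : ∀ y ∈ c ++ [x], pvRank y = 2 := by
        intro y hy'
        rcases List.mem_append.mp hy' with h | h
        · exact hc y h
        · simp at h; simp [h, h2]
      rw [hstep, ih a b (c ++ [x]) ha hb hc' ht]
      simp [h2]

-- The stable sort of the kept elements is the three rank segments in order.
theorem sorted_kept (kept : List (List (String × String)))
    (hk : ∀ x ∈ kept, pvKeep x = true) :
    PySem.List.sorted kept pvRank
    = kept.filter (fun f => pvRank f == 0) ++ kept.filter (fun f => pvRank f == 1)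
      ++ kept.filter (fun f => pvRank f == 2) := by
  rw [PySem.List.sorted_eq_foldl_insertBy]
  have := foldl_ins kept [] [] [] (by simp) (by simp) (by simp) hk
  simpa using this

-- Rank filters of the kept list are the realm filters of the input.
theorem keep_rank_filter (funcs : List (List (String × String))) (r : String) (n : Int)
    (hrn : ∀ f : List (String × String), (pvKeep f && (pvRank f == n)) = (f.lookup "realm" == some r)) :
    (funcs.filter pvKeep).filter (fun f => pvRank f == n)
    = funcs.filter (fun f => f.lookup "realm" == some r) := by
  rw [List.filter_filter]
  exact List.filter_congr (fun f _ => by rw [Bool.and_comm]; exact hrn f)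

theorem rank_client (f : List (String × String)) :
    (pvKeep f && (pvRank f == (0:Int))) = (f.lookup "realm" == some "client") := by
  unfold pvKeep pvRank
  cases hl : f.lookup "realm" with
  | none => simp
  | some r =>
    by_cases h1 : r = "client" <;> by_cases h2 : r = "server" <;> by_cases h3 : r = "shared" <;>
      simp [h1, h2, h3]

theorem rank_server (f : List (String × String)) :
    (pvKeep f && (pvRank f == (1:Int))) = (f.lookup "realm" == some "server") := by
  unfold pvKeep pvRank
  cases hl : f.lookup "realm" with
  | none => simp
  | some r =>
    by_cases h1 : r = "client" <;> by_cases h2 : r = "server" <;> by_cases h3 : r = "shared" <;>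
      simp [h1, h2, h3]

theorem rank_shared (f : List (String × String)) :
    (pvKeep f && (pvRank f == (2:Int))) = (f.lookup "realm" == some "shared") := by
  unfold pvKeep pvRank
  cases hl : f.lookup "realm" with
  | none => simp
  | some r =>
    by_cases h1 : r = "client" <;> by_cases h2 : r = "server" <;> by_cases h3 : r = "shared" <;>
      simp [h1, h2, h3]

-- Membership in a realm filter determines the rank.
theorem rank0_of_client (f : List (String × String)) (h : f.lookup "realm" = some "client") :
    pvRank f = 0 := by simp [pvRank, h]
theorem rank1_of_server (f : List (String × String)) (h : f.lookup "realm" = some "server") :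
    pvRank f = 1 := by simp [pvRank, h]
theorem rank2_of_shared (f : List (String × String)) (h : f.lookup "realm" = some "shared") :
    pvRank f = 2 := by simp [pvRank, h]

-- ===== VERDICT (by name: the statement is the Claim_ definition above) =====
theorem separate_per_realm_spec : Claim_equal_separate_per_realm := by
  intro funcs _ _
  unfold Spec_separate_per_realm separate_per_realm separate_per_realm_alt
  rw [separate_loop funcs [] [] []]
  set Fc := funcs.filter (fun f => f.lookup "realm" == some "client") with hFc
  set Fs := funcs.filter (fun f => f.lookup "realm" == some "server") with hFs
  set Fh := funcs.filter (fun f => f.lookup "realm" == some "shared") with hFh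
  have memc : ∀ f ∈ Fc, f.lookup "realm" = some "client" := fun f hf => by
    have := (List.mem_filter.mp (hFc ▸ hf)).2; simpa using this
  have mems : ∀ f ∈ Fs, f.lookup "realm" = some "server" := fun f hf => by
    have := (List.mem_filter.mp (hFs ▸ hf)).2; simpa using this
  have memh : ∀ f ∈ Fh, f.lookup "realm" = some "shared" := fun f hf => by
    have := (List.mem_filter.mp (hFh ▸ hf)).2; simpa using this
  have hk : ∀ x ∈ funcs.filter pvKeep, pvKeep x = true := fun x hx => (List.mem_filter.mp hx).2
  have hsrt : PySem.List.sorted (funcs.filter pvKeep) pvRank = Fc ++ Fs ++ Fh := by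
    rw [sorted_kept _ hk, keep_rank_filter funcs "client" 0 rank_client,
      keep_rank_filter funcs "server" 1 rank_server,
      keep_rank_filter funcs "shared" 2 rank_shared]
  simp only [hsrt]
  have hc : (Fc ++ Fs ++ Fh).filter (fun f => pvRank f == 0) = Fc := by
    simp only [List.filter_append]
    rw [List.filter_eq_self.mpr (fun f hf => by simp [rank0_of_client f (memc f hf)]),
      List.filter_eq_nil_iff.mpr (fun f hf => by simp [rank1_of_server f (mems f hf)]),
      List.filter_eq_nil_iff.mpr (fun f hf => by simp [rank2_of_shared f (memh f hf)])]
    simp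
  have hs : (Fc ++ Fs ++ Fh).filter (fun f => pvRank f == 1) = Fs := by
    simp only [List.filter_append]
    rw [List.filter_eq_nil_iff.mpr (fun f hf => by simp [rank0_of_client f (memc f hf)]),
      List.filter_eq_self.mpr (fun f hf => by simp [rank1_of_server f (mems f hf)]),
      List.filter_eq_nil_iff.mpr (fun f hf => by simp [rank2_of_shared f (memh f hf)])]
    simp
  rw [hc, hs]
  refine Prod.ext ?_ (Prod.ext ?_ ?_)
  · show Fc = (Fc ++ Fs ++ Fh).take Fc.length
    rw [List.append_assoc]
    exact List.take_left.symm
  · show Fs = ((Fc ++ Fs ++ Fh).drop Fc.length).take Fs.length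
    rw [List.append_assoc, List.drop_left]
    exact List.take_left.symm
  · show Fh = (Fc ++ Fs ++ Fh).drop (Fc.length + Fs.length)
    rw [show Fc.length + Fs.length = (Fc ++ Fs).length by simp]
    exact List.drop_left.symm
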